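-- pv_equiv track=rewrite | github.com/hngnzzz/PokemonNotifications | discord-pokemon-bot/item_logic.py | search_item_names
-- ===== SOURCE A (Python) =====
-- def search_item_names(names: list[str], query: str, limit: int = 10) -> list[str]:
--     normalized_query = query.strip().lower().replace(" ", "-").replace(".", "")
--     compact_query = normalized_query.replace("-", "")
--
--     starts_with: list[str] = []
--     contains: list[str] = []
--
--     for item_name in names:
--         compact_name = item_name.replace("-", "")
--         if item_name.startswith(normalized_query) or compact_name.startswith(compact_query):
--             starts_with.append(item_name)
--         elif normalized_query in item_name or compact_query in compact_name:
--             contains.append(item_name)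
--
--     return (starts_with + contains)[:limit]
-- ===== SOURCE B (Python) =====
-- def search_item_names(names: list[str], query: str, limit: int = 10) -> list[str]:
--     normalized_query = query.strip().lower().replace(" ", "-").replace(".", "")
--     compact_query = normalized_query.replace("-", "")
--
--     def rank(name):
--         compact = name.replace("-", "")
--         if name.startswith(normalized_query) or compact.startswith(compact_query):
--             return 0
--         if normalized_query in name or compact_query in compact:
--             return 1
--         return None
--
--     matches = []
--     for name in names:
--         r = rank(name)
--         if r is not None:
--             matches.append((name, r))
--     ranked = sorted(matches, key=lambda p: p[1])
--     return [name for name, _ in ranked][:limit]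
-- ===== Notes on version B (the rewrite author's own statement) =====
-- stated objective: alternative
-- what changed: Replaces the two-accumulator bucket loop (starts_with/contains then concatenate) by a rank-then-stable-sort: one pass assigns each matching name rank 0 (prefix match) or 1 (substring-only match), then a stable sort on the rank produces the final order.
import Mathlib
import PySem

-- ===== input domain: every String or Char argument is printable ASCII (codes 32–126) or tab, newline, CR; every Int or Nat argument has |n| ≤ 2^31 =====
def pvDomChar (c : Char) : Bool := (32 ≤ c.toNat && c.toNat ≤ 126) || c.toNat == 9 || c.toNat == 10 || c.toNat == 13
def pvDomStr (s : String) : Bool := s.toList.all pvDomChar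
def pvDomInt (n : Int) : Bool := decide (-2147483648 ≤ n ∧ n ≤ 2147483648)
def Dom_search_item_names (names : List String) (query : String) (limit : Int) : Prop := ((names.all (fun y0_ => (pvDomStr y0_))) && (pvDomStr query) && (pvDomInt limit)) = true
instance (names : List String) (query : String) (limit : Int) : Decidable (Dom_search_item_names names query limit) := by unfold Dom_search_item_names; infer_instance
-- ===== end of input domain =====

-- B replaces A's two bucket lists by a single pass assigning ranks plus a stable sort on the rank (alternative decomposition, same cost class).

-- ===== PORT A =====
def search_item_names (names : List String) (query : String) (limit : Int) : List String :=
  let normalized_query :=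
    PySem.Str.replace (PySem.Str.replace (PySem.Str.lower (PySem.Str.strip query)) " " "-") "." ""
  let compact_query := PySem.Str.replace normalized_query "-" ""
  let acc := names.foldl (fun (acc : List String × List String) item_name =>
    let compact_name := PySem.Str.replace item_name "-" ""
    if PySem.Str.startswith item_name normalized_query || PySem.Str.startswith compact_name compact_query then
      (acc.1 ++ [item_name], acc.2)
    else if PySem.Str.isIn normalized_query item_name || PySem.Str.isIn compact_query compact_name then
      (acc.1, acc.2 ++ [item_name])
    else acc) ([], [])
  PySem.List.slice (acc.1 ++ acc.2) none (some limit)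

-- ===== PORT B =====
-- helper = Source B's inner 'rank'
def pvRank (normalized_query compact_query name : String) : Option Int :=
  let compact := PySem.Str.replace name "-" ""
  if PySem.Str.startswith name normalized_query || PySem.Str.startswith compact compact_query then some 0
  else if PySem.Str.isIn normalized_query name || PySem.Str.isIn compact_query compact then some 1
  else none

def search_item_names_alt (names : List String) (query : String) (limit : Int) : List String :=
  let normalized_query :=
    PySem.Str.replace (PySem.Str.replace (PySem.Str.lower (PySem.Str.strip query)) " " "-") "." ""
  let compact_query := PySem.Str.replace normalized_query "-" ""
  let matchList := names.foldl (fun (acc : List (String × Int)) name =>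
    match pvRank normalized_query compact_query name with
    | some r => acc ++ [(name, r)]
    | none => acc) []
  let ranked := PySem.List.sorted matchList (fun p => p.2) false
  PySem.List.slice (ranked.map Prod.fst) none (some limit)

-- ===== PRECONDITION & SPEC =====
def Spec_search_item_names (names : List String) (query : String) (limit : Int) (out : List String) : Prop := out = search_item_names_alt names query limit
instance (names : List String) (query : String) (limit : Int) (out : List String) : Decidable (Spec_search_item_names names query limit out) := by unfold Spec_search_item_names; infer_instance

-- ===== CLAIM (what is proved, stated in full; the proofs are below) =====
def Claim_equal_search_item_names : Prop := ∀ (names : List String) (query : String) (limit : Int), Dom_search_item_names names query limit → Spec_search_item_names names query limit (search_item_names names query limit)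

-- ===== LEMMAS AND PROOFS =====

-- insertBy skips a prefix on which 'before' is false
theorem pv_insertBy_append {α : Type} (bef : α → α → Bool) (x : α) (l0 l1 : List α)
    (h : ∀ y ∈ l0, bef x y = false) :
    PySem.List.insertBy bef x (l0 ++ l1) = l0 ++ PySem.List.insertBy bef x l1 := by
  induction l0 with
  | nil => simp
  | cons a t ih =>
    simp only [List.cons_append, PySem.List.insertBy]
    rw [h a (by simp)]
    simp [ih (fun y hy => h y (by simp [hy]))]

-- inserting into a rank-0-block ++ rank-1-block
theorem pv_insertBy_binary (x : String × Int) (l0 l1 : List (String × Int))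
    (h0 : ∀ p ∈ l0, p.2 = 0) (h1 : ∀ p ∈ l1, p.2 = 1) (hx : x.2 = 0 ∨ x.2 = 1) :
    PySem.List.insertBy (fun a b => decide (a.2 < b.2)) x (l0 ++ l1)
      = if x.2 = 0 then l0 ++ x :: l1 else (l0 ++ l1) ++ [x] := by
  rcases hx with hx | hx
  · rw [if_pos hx]
    rw [pv_insertBy_append _ _ _ _ (fun y hy => by simp [hx, h0 y hy])]
    cases l1 with
    | nil => simp [PySem.List.insertBy]
    | cons b t =>
      have hb : x.2 < b.2 := by rw [hx, h1 b (by simp)]; norm_num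
      simp [PySem.List.insertBy, hb]
  · rw [if_neg (by omega)]
    rw [PySem.List.insertBy_of_forall_not_before]
    intro y hy
    rcases List.mem_append.1 hy with hy | hy
    · simp [hx, h0 y hy]
    · simp [hx, h1 y hy]

-- folding insertBy over a binary-ranked list keeps the two blocks
theorem pv_foldl_insert_binary (m : List (String × Int)) :
    ∀ (l0 l1 : List (String × Int)),
    (∀ p ∈ l0, p.2 = 0) → (∀ p ∈ l1, p.2 = 1) → (∀ p ∈ m, p.2 = 0 ∨ p.2 = 1) →
    m.foldl (fun acc x => PySem.List.insertBy (fun a b => decide (a.2 < b.2)) x acc) (l0 ++ l1)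
      = (l0 ++ m.filter (fun p => p.2 == 0)) ++ (l1 ++ m.filter (fun p => p.2 == 1)) := by
  induction m with
  | nil => intro l0 l1 _ _ _; simp
  | cons x t ih =>
    intro l0 l1 h0 h1 hm
    simp only [List.foldl_cons]
    rw [pv_insertBy_binary x l0 l1 h0 h1 (hm x (by simp))]
    rcases hm x (by simp) with hx | hx
    · rw [if_pos hx]
      have : l0 ++ x :: l1 = (l0 ++ [x]) ++ l1 := by simp
      rw [this, ih (l0 ++ [x]) l1
        (by intro p hp; rcases List.mem_append.1 hp with hp | hp
            · exact h0 p hp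
            · simp at hp; simp [hp, hx])
        h1 (fun p hp => hm p (by simp [hp]))]
      simp [hx]
    · rw [if_neg (by omega)]
      have : (l0 ++ l1) ++ [x] = l0 ++ (l1 ++ [x]) := by simp
      rw [this, ih l0 (l1 ++ [x]) h0
        (by intro p hp; rcases List.mem_append.1 hp with hp | hp
            · exact h1 p hp
            · simp at hp; simp [hp, hx])
        (fun p hp => hm p (by simp [hp]))]
      simp [hx]

-- A's loop, characterized by two filters
theorem pv_afold (f0 f1 : String → Bool) (names : List String) :
    ∀ (s c : List String),
    names.foldl (fun (acc : List String × List String) n =>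
        if f0 n then (acc.1 ++ [n], acc.2)
        else if f1 n then (acc.1, acc.2 ++ [n])
        else acc) (s, c)
      = (s ++ names.filter f0, c ++ names.filter (fun n => !f0 n && f1 n)) := by
  induction names with
  | nil => intro s c; simp
  | cons x t ih =>
    intro s c
    simp only [List.foldl_cons]
    by_cases h0 : f0 x
    · simp [h0, ih]
    · by_cases h1 : f1 x
      · simp [h0, h1, ih]
      · simp [h0, h1, ih]

-- B's collection loop as a flatMap
theorem pv_bfold (g : String → List (String × Int)) (names : List String) :
    ∀ (m : List (String × Int)),
    names.foldl (fun acc n => acc ++ g n) m = m ++ names.flatMap g := by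
  induction names with
  | nil => intro m; simp
  | cons x t ih => intro m; simp [ih, List.flatMap_cons]

theorem pv_filter0 (f0 f1 : String → Bool) (names : List String) :
    ((names.flatMap (fun n => if f0 n then [(n, (0:Int))] else if f1 n then [(n, 1)] else [])).filter
        (fun p => p.2 == 0)).map Prod.fst = names.filter f0 := by
  induction names with
  | nil => simp
  | cons x t ih =>
    by_cases h0 : f0 x
    · simp [List.flatMap_cons, h0] at *
      simp [ih]
    · by_cases h1 : f1 x <;>
        simp [List.flatMap_cons, h0, h1, ih]

theorem pv_filter1 (f0 f1 : String → Bool) (names : List String) :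
    ((names.flatMap (fun n => if f0 n then [(n, (0:Int))] else if f1 n then [(n, 1)] else [])).filter
        (fun p => p.2 == 1)).map Prod.fst = names.filter (fun n => !f0 n && f1 n) := by
  induction names with
  | nil => simp
  | cons x t ih =>
    by_cases h0 : f0 x
    · simp [List.flatMap_cons, h0, ih]
    · by_cases h1 : f1 x <;>
        simp [List.flatMap_cons, h0, h1, ih]

theorem pv_mem_binary (f0 f1 : String → Bool) (names : List String) :
    ∀ p ∈ names.flatMap (fun n => if f0 n then [(n, (0:Int))] else if f1 n then [(n, 1)] else []),
      p.2 = 0 ∨ p.2 = 1 := by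
  intro p hp
  rcases List.mem_flatMap.1 hp with ⟨n, _, hn⟩
  by_cases h0 : f0 n
  · simp [h0] at hn; simp [hn]
  · by_cases h1 : f1 n <;> simp [h0, h1] at hn
    simp [hn]

theorem pv_main (f0 f1 : String → Bool) (names : List String) (limit : Int) :
    PySem.List.slice
      ((names.foldl (fun (acc : List String × List String) n =>
          if f0 n then (acc.1 ++ [n], acc.2)
          else if f1 n then (acc.1, acc.2 ++ [n])
          else acc) ([], [])).1
        ++ (names.foldl (fun (acc : List String × List String) n =>
          if f0 n then (acc.1 ++ [n], acc.2)
          else if f1 n then (acc.1, acc.2 ++ [n])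
          else acc) ([], [])).2) none (some limit)
    = PySem.List.slice
      ((PySem.List.sorted
          (names.foldl (fun (acc : List (String × Int)) n =>
            acc ++ (if f0 n then [(n, (0:Int))] else if f1 n then [(n, 1)] else [])) [])
          (fun p => p.2) false).map Prod.fst) none (some limit) := by
  rw [pv_afold f0 f1 names]
  have hB := pv_bfold (fun n => if f0 n then [(n, (0:Int))] else if f1 n then [(n, 1)] else []) names []
  rw [hB]
  simp only [List.nil_append]
  have hsorted : PySem.List.sorted
      (names.flatMap (fun n => if f0 n then [(n, (0:Int))] else if f1 n then [(n, 1)] else []))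
      (fun p => p.2) false
      = (names.flatMap (fun n => if f0 n then [(n, (0:Int))] else if f1 n then [(n, 1)] else [])).filter (fun p => p.2 == 0)
        ++ (names.flatMap (fun n => if f0 n then [(n, (0:Int))] else if f1 n then [(n, 1)] else [])).filter (fun p => p.2 == 1) := by
    rw [PySem.List.sorted_eq_foldl_insertBy]
    simpa using pv_foldl_insert_binary _ [] [] (by simp) (by simp) (pv_mem_binary f0 f1 names)
  rw [hsorted]
  simp only [List.map_append, pv_filter0 f0 f1 names, pv_filter1 f0 f1 names]

theorem pv_port (nq : String) (names : List String) (limit : Int) :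
    PySem.List.slice
      ((names.foldl (fun (acc : List String × List String) item_name =>
          if PySem.Str.startswith item_name nq
              || PySem.Str.startswith (PySem.Str.replace item_name "-" "") (PySem.Str.replace nq "-" "") then
            (acc.1 ++ [item_name], acc.2)
          else if PySem.Str.isIn nq item_name
              || PySem.Str.isIn (PySem.Str.replace nq "-" "") (PySem.Str.replace item_name "-" "") then
            (acc.1, acc.2 ++ [item_name])
          else acc) ([], [])).1
        ++ (names.foldl (fun (acc : List String × List String) item_name =>
          if PySem.Str.startswith item_name nq
              || PySem.Str.startswith (PySem.Str.replace item_name "-" "") (PySem.Str.replace nq "-" "") then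
            (acc.1 ++ [item_name], acc.2)
          else if PySem.Str.isIn nq item_name
              || PySem.Str.isIn (PySem.Str.replace nq "-" "") (PySem.Str.replace item_name "-" "") then
            (acc.1, acc.2 ++ [item_name])
          else acc) ([], [])).2) none (some limit)
    = PySem.List.slice
      ((PySem.List.sorted
          (names.foldl (fun (acc : List (String × Int)) name =>
            match pvRank nq (PySem.Str.replace nq "-" "") name with
            | some r => acc ++ [(name, r)]
            | none => acc) [])
          (fun p => p.2) false).map Prod.fst) none (some limit) := by
  have hBfun : (fun (acc : List (String × Int)) name =>
      match pvRank nq (PySem.Str.replace nq "-" "") name with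
      | some r => acc ++ [(name, r)]
      | none => acc)
      = fun (acc : List (String × Int)) n =>
          acc ++ (if PySem.Str.startswith n nq
              || PySem.Str.startswith (PySem.Str.replace n "-" "") (PySem.Str.replace nq "-" "") then [(n, (0:Int))]
            else if PySem.Str.isIn nq n
              || PySem.Str.isIn (PySem.Str.replace nq "-" "") (PySem.Str.replace n "-" "") then [(n, 1)]
            else []) := by
    funext acc n
    simp only [pvRank]
    split_ifs <;> simp
  rw [hBfun]
  exact pv_main
    (fun n => PySem.Str.startswith n nq
      || PySem.Str.startswith (PySem.Str.replace n "-" "") (PySem.Str.replace nq "-" ""))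
    (fun n => PySem.Str.isIn nq n
      || PySem.Str.isIn (PySem.Str.replace nq "-" "") (PySem.Str.replace n "-" ""))
    names limit

-- ===== VERDICT (by name: the statement is the Claim_ definition above) =====
set_option maxHeartbeats 1000000 in
theorem search_item_names_spec : Claim_equal_search_item_names := by
  intro names query limit _
  unfold Spec_search_item_names search_item_names search_item_names_alt
  exact pv_port
    (PySem.Str.replace (PySem.Str.replace (PySem.Str.lower (PySem.Str.strip query)) " " "-") "." "")
    names limit
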